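-- pv_equiv track=rewrite | github.com/Siretristepain/advent_of_code_2k25 | DAY_7/part_2_test.py | count_possibility_for_line
-- ===== SOURCE A (Python) =====
-- def count_possibility_for_line(line: list[list[str]]) -> int:
--
--     nb_possibility = 0
--
--     for i in range(len(line)):
--         current_car = line[i]
--
--         if current_car == '|':
--             count_for = 1
--
--             # If '|' on first or last digit, it counts for 1 (mandatory)
--             if i > 0 and i < len(line)-1:
--                 previous_car = line[i-1]
--                 next_car = line[i+1]
--
--                 if previous_car == '^' and next_car == '^':
--                     count_for = 2
--
--             nb_possibility += count_for
--
--     return nb_possibility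
-- ===== SOURCE B (Python) =====
-- def count_possibility_for_line(line: list[list[str]]) -> int:
--     base = line.count('|')
--     bonus = sum(1 for prev, cur, nxt in zip(line, line[1:], line[2:])
--                 if cur == '|' and prev == '^' and nxt == '^')
--     return base + bonus
-- ===== Notes on version B (the rewrite author's own statement) =====
-- stated objective: simpler
-- what changed: Replaces the index loop with its per-element 1-or-2 branch by two aggregates: a plain count of '|' plus a zip-of-triples scan counting interior '^|^' bonuses, summed at the end.
import Mathlib
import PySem

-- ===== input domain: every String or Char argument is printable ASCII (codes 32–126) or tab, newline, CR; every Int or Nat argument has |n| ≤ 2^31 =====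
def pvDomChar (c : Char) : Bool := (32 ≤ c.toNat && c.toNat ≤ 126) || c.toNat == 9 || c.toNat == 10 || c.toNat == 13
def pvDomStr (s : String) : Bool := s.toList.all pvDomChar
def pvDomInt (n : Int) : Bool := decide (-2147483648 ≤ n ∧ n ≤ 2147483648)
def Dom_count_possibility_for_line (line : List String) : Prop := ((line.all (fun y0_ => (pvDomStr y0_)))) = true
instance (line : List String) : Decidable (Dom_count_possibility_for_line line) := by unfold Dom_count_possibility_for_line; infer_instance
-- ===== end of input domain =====

-- B replaces A's single per-index 1-or-2 branch by two aggregates (a plain '|' count plus a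
-- zip-of-triples bonus count) summed at the end; objective: simpler.

-- ===== PORT A =====
def count_possibility_for_line (line : List String) : Int :=
  (PySem.List.pyRange 0 (line.length : Int) 1).foldl (fun nb_possibility i =>
    let current_car := PySem.List.pyGetD line i ""   -- index i ∈ range(len(line)), always in range
    if current_car = "|" then
      let count_for : Int :=
        if 0 < i ∧ i < (line.length : Int) - 1 then
          let previous_car := PySem.List.pyGetD line (i - 1) ""
          let next_car := PySem.List.pyGetD line (i + 1) ""
          if previous_car = "^" ∧ next_car = "^" then 2 else 1
        else 1
      nb_possibility + count_for
    else nb_possibility) 0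

-- ===== PORT B =====
def count_possibility_for_line_alt (line : List String) : Int :=
  let base : Int := (line.count "|" : Nat)
  let bonus : Int :=
    (((line.zip (PySem.List.slice line (some 1) none)).zip
        (PySem.List.slice line (some 2) none)).countP
      (fun t => t.1.2 == "|" && t.1.1 == "^" && t.2 == "^") : Nat)
  base + bonus

-- ===== PRECONDITION & SPEC =====
def Spec_count_possibility_for_line (line : List String) (out : Int) : Prop := out = count_possibility_for_line_alt line
instance (line : List String) (out : Int) : Decidable (Spec_count_possibility_for_line line out) := by unfold Spec_count_possibility_for_line; infer_instance

-- ===== CLAIM (what is proved, stated in full; the proofs are below) =====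
def Claim_equal_count_possibility_for_line : Prop := ∀ (line : List String), Dom_count_possibility_for_line line → Spec_count_possibility_for_line line (count_possibility_for_line line)

-- ===== LEMMAS AND PROOFS =====

/-- Common characterisation: weight of each element, carrying the previous element as context. -/
def pvS : Option String → List String → Int
  | _, [] => 0
  | p, x :: rest =>
    (if x = "|" then (if p = some "^" ∧ rest.head? = some "^" then (2 : Int) else 1) else 0)
      + pvS (some x) rest

/-- B's bonus, written structurally. -/
def pvTrip : List String → Int
  | x :: y :: r => (if y = "|" ∧ x = "^" ∧ r.head? = some "^" then (1 : Int) else 0) + pvTrip (y :: r)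
  | _ => 0

lemma pvS_some (l : List String) : ∀ x : String,
    pvS (some x) l = (l.count "|" : Nat) + pvTrip (x :: l) := by
  induction l with
  | nil => intro x; simp [pvS, pvTrip]
  | cons y r ih =>
    intro x
    simp only [pvS, pvTrip, ih y, List.count_cons]
    by_cases hy : y = "|" <;> by_cases hx : x = "^" <;>
      by_cases hh : r.head? = some "^" <;>
      simp [hy, hx, hh] <;> push_cast <;> ring

lemma pvS_none (l : List String) : pvS none l = (l.count "|" : Nat) + pvTrip l := by
  cases l with
  | nil => simp [pvS, pvTrip]
  | cons x r =>
    simp only [pvS, pvS_some, List.count_cons]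
    cases r with
    | nil => by_cases hx : x = "|" <;> simp [pvTrip, hx]
    | cons y r' =>
      simp only [pvTrip]
      by_cases hx : x = "|" <;> simp [hx] <;> push_cast <;> ring

lemma trip_zip (l : List String) :
    ((((l.zip l.tail).zip l.tail.tail).countP
        (fun t => t.1.2 == "|" && t.1.1 == "^" && t.2 == "^") : Nat) : Int) = pvTrip l := by
  induction l with
  | nil => simp [pvTrip]
  | cons x rest ih =>
    cases rest with
    | nil => simp [pvTrip]
    | cons y r =>
      cases r with
      | nil => simp [pvTrip]
      | cons z r' =>
        simp only [List.tail_cons, List.zip_cons_cons, List.countP_cons, pvTrip] at ih ⊢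
        rw [← ih]
        by_cases h : (y = "|" ∧ x = "^" ∧ z = "^")
        · simp [h.1, h.2.1, h.2.2]
          push_cast; ring
        · have : ((y == "|") && (x == "^") && (z == "^")) = false := by
            simp only [Bool.and_eq_false_iff, beq_eq_false_iff_ne, ne_eq]
            by_cases h1 : y = "|" <;> by_cases h2 : x = "^" <;> by_cases h3 : z = "^" <;>
              simp [h1, h2, h3] at h ⊢
          simp [this, h]

lemma b_eq_pvS (line : List String) :
    count_possibility_for_line_alt line = pvS none line := by
  unfold count_possibility_for_line_alt
  rw [pvS_none]
  have hs2 : PySem.List.slice line (some 2) none = line.tail.tail := by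
    have : PySem.List.slice line (some 2) none = line.drop 2 := by
      simpa using PySem.List.slice_from line (a := 2) (by omega)
    rw [this]
    cases line with
    | nil => rfl
    | cons a t => cases t <;> rfl
  simp only [PySem.List.slice_from_one, hs2]
  rw [trip_zip]

/-- The fold over indices from k computes pvS over the suffix, with the correct previous-element context. -/
lemma a_fold (line : List String) : ∀ (t : List String) (k : Nat) (c : Int),
    line.drop k = t → k ≤ line.length →
    (PySem.List.pyRange (k : Int) (line.length : Int) 1).foldl (fun nb_possibility i =>
      let current_car := PySem.List.pyGetD line i ""
      if current_car = "|" then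
        let count_for : Int :=
          if 0 < i ∧ i < (line.length : Int) - 1 then
            let previous_car := PySem.List.pyGetD line (i - 1) ""
            let next_car := PySem.List.pyGetD line (i + 1) ""
            if previous_car = "^" ∧ next_car = "^" then 2 else 1
          else 1
        nb_possibility + count_for
      else nb_possibility) c
    = c + pvS (if k = 0 then none else some (line.getD (k - 1) "")) t := by
  intro t
  induction t with
  | nil =>
    intro k c hdrop hk
    have hlen : line.length - k = 0 := by
      have := congrArg List.length hdrop; simpa using this
    rw [PySem.List.pyRange_one_eq_nil (by omega)]
    simp [pvS]
  | cons x rest ih =>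
    intro k c hdrop hk
    have hlt : k < line.length := by
      have := congrArg List.length hdrop; simp at this; omega
    have h0 : getElem? line k = some x := by
      have h := @List.getElem?_drop String line k 0
      rw [hdrop] at h; simpa using h.symm
    have hx : line.getD k "" = x := by
      simp [List.getD_eq_getElem?_getD, h0]
    have hrest : line.drop (k + 1) = rest := by
      have : (line.drop k).tail = rest := by rw [hdrop]; rfl
      simpa [List.tail_drop] using this
    have hrlen : rest.length = line.length - (k + 1) := by
      have := congrArg List.length hrest; simp at this; omega
    rw [PySem.List.pyRange_one_cons (by exact_mod_cast hlt)]
    have hcast : ((k : Int) + 1) = ((k + 1 : Nat) : Int) := by push_cast; ring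
    rw [List.foldl_cons, hcast, ih (k + 1) _ hrest (by omega)]
    have hprev : (if k + 1 = 0 then none else some (line.getD (k + 1 - 1) "")) = some x := by
      rw [if_neg (Nat.succ_ne_zero k), Nat.add_sub_cancel, hx]
    rw [hprev]
    -- evaluate the step function at index k
    simp only [PySem.List.pyGetD_natCast, hx]
    have h1 : getElem? line (k + 1) = rest.head? := by
      have h := @List.getElem?_drop String line (k + 1) 0
      rw [hrest] at h
      simpa [List.head?_eq_getElem?] using h.symm
    have hheadD : line.getD (k + 1) "" = rest.head?.getD "" := by
      simp [List.getD_eq_getElem?_getD, h1]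
    by_cases hpx : x = "|"
    · simp only [hpx, if_pos rfl, pvS]
      by_cases hmid : 0 < (k : Int) ∧ (k : Int) < (line.length : Int) - 1
      · have hk0 : 0 < k := by exact_mod_cast hmid.1
        have hk1 : k + 1 < line.length := by
          have h2' := hmid.2; omega
        have hm1 : ((k : Int) - 1) = ((k - 1 : Nat) : Int) := by omega
        have hp1 : ((k : Int) + 1) = ((k + 1 : Nat) : Int) := by omega
        rw [if_pos hmid]
        simp only [hm1, hp1, PySem.List.pyGetD_natCast]
        have hne : rest ≠ [] := by
          intro h; rw [h] at hrlen; simp at hrlen; omega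
        have hhead : rest.head? = some (rest.headD "") := by
          cases rest with
          | nil => exact absurd rfl hne
          | cons a t => rfl
        have hifk : (if k = 0 then none else some (line.getD (k - 1) "")) = some (line.getD (k-1) "") := by
          simp [Nat.pos_iff_ne_zero.mp hk0]
        rw [hifk, hhead, hheadD]
        have hhd : rest.headD "" = rest.head?.getD "" := by cases rest <;> rfl
        by_cases hp : line.getD (k - 1) "" = "^" <;>
          by_cases hq : rest.head?.getD "" = "^" <;>
          simp [hp, hq, hhd] <;> ring
      · rw [if_neg hmid]
        -- either k = 0 (no previous) or k is the last index (rest = [])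
        have : (if (if k = 0 then none else some (line.getD (k - 1) "")) = some "^" ∧ rest.head? = some "^" then (2:Int) else 1) = 1 := by
          by_cases hk0 : k = 0
          · simp [hk0]
          · have hklast : k + 1 = line.length := by
              have h1 : ¬ ((k : Int) < (line.length : Int) - 1) := by
                intro hcon; exact hmid ⟨by exact_mod_cast Nat.pos_of_ne_zero hk0, hcon⟩
              omega
            have : rest = [] := by
              have : rest.length = 0 := by omega
              exact List.length_eq_zero_iff.mp this
            simp [this]
        rw [this]
        split_ifs <;> ring
    · rw [if_neg hpx]
      simp only [pvS, if_neg hpx]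
      ring

lemma a_eq_pvS (line : List String) :
    count_possibility_for_line line = pvS none line := by
  unfold count_possibility_for_line
  have := a_fold line line 0 0 (by simp) (by omega)
  simpa using this

-- ===== VERDICT (by name: the statement is the Claim_ definition above) =====
theorem count_possibility_for_line_spec : Claim_equal_count_possibility_for_line := by
  intro line _
  unfold Spec_count_possibility_for_line
  rw [a_eq_pvS, b_eq_pvS]
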